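-- pv_equiv track=rewrite | github.com/xz-blender/wxz_pie_menus | parts_addons/NB666/nb_grease_pencil_to_bbone_ctrl_ops.py | adv_rename
-- ===== SOURCE A (Python) =====
-- def adv_rename(string,insertname):
--     suffixes = ["left", "right", "_l", "_r", ".l", ".r", "-l", "-r", " l", " r"]
--     # 检查字符串是否以指定的后缀结尾
--     if any(string.lower().endswith(suffix) for suffix in suffixes):
--         # 找到后缀的位置
--         suffix_index = len(string)
--         for suffix in suffixes:
--             if string.lower().endswith(suffix):
--                 suffix_index -= len(suffix)
--                 break
--         # 在后缀前插入"_mingcheng"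
--         newName = string[:suffix_index] + insertname + string[suffix_index:]
--
--     else:
--         newName=string+ insertname
--     return newName
-- ===== SOURCE B (Python) =====
-- def adv_rename(string, insertname):
--     low = string.lower()
--     if low.endswith("left"):
--         cut = 4
--     elif low.endswith("right"):
--         cut = 5
--     elif len(low) >= 2 and low[-1] in ('l', 'r') and low[-2] in ('_', '.', '-', ' '):
--         cut = 2
--     else:
--         cut = 0
--     i = len(string) - cut
--     return string[:i] + insertname + string[i:]
-- ===== Notes on version B (the rewrite author's own statement) =====
-- stated objective: simpler
-- what changed: A scans the 10-entry suffix list twice (any() then a find-first loop with break); B never iterates a suffix list: it classifies the ending directly with a cascade - endswith('left'), endswith('right'), else an inspection of the last two characters (separator in '_.- ' followed by l/r) - and computes the insertion point once.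
import Mathlib
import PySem

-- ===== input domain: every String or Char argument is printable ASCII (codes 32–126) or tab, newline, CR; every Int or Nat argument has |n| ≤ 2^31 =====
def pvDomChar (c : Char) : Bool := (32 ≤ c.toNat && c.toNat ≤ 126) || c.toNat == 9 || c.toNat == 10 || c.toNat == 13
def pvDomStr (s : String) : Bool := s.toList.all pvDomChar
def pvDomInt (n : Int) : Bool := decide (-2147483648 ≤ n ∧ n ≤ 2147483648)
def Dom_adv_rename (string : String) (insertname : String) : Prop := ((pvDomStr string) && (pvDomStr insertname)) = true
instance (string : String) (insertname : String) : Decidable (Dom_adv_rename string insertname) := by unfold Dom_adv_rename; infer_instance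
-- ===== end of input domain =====

-- B replaces A's any()+find-first-suffix double scan of the suffix list by a direct cascade that
-- classifies the ending ("left"/"right"/separator+l|r) from the last characters; same return value.

-- ===== PORT A =====
def adv_rename_suffixes : List String :=
  ["left", "right", "_l", "_r", ".l", ".r", "-l", "-r", " l", " r"]

-- the 'for suffix in suffixes: if …: suffix_index -= len(suffix); break' loop
def adv_rename_findIdx (string : String) : List String → Int → Int
  | [], idx => idx
  | suffix :: rest, idx =>
    if PySem.Str.endswith (PySem.Str.lower string) suffix then
      idx - (PySem.Str.len suffix : Int)
    else adv_rename_findIdx string rest idx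

def adv_rename (string : String) (insertname : String) : String :=
  if adv_rename_suffixes.any
      (fun suffix => PySem.Str.endswith (PySem.Str.lower string) suffix) then
    let suffix_index :=
      adv_rename_findIdx string adv_rename_suffixes (PySem.Str.len string : Int)
    PySem.Str.slice string none (some suffix_index) ++ insertname
      ++ PySem.Str.slice string (some suffix_index) none
  else
    string ++ insertname

-- ===== PORT B =====
-- `low[-1] in ('l','r')` is an equality test against each tuple element; the `len(low) >= 2`
-- guard short-circuits in Python, here pyGet? returns none on short strings and Option.any is false.
def adv_rename_alt (string : String) (insertname : String) : String :=
  let low := PySem.Str.lower string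
  let cut : Nat :=
    if PySem.Str.endswith low "left" then 4
    else if PySem.Str.endswith low "right" then 5
    else if decide (2 ≤ PySem.Str.len low)
        && (PySem.Str.pyGet? low (-1)).any (fun c => c == 'l' || c == 'r')
        && (PySem.Str.pyGet? low (-2)).any
            (fun c => c == '_' || c == '.' || c == '-' || c == ' ') then 2
    else 0
  let i : Int := (PySem.Str.len string : Int) - (cut : Int)
  PySem.Str.slice string none (some i) ++ insertname ++ PySem.Str.slice string (some i) none

-- ===== PRECONDITION & SPEC =====
def Spec_adv_rename (string : String) (insertname : String) (out : String) : Prop := out = adv_rename_alt string insertname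
instance (string : String) (insertname : String) (out : String) : Decidable (Spec_adv_rename string insertname out) := by unfold Spec_adv_rename; infer_instance

-- ===== CLAIM (what is proved, stated in full; the proofs are below) =====
def Claim_equal_adv_rename : Prop := ∀ (string : String) (insertname : String), Dom_adv_rename string insertname → Spec_adv_rename string insertname (adv_rename string insertname)

-- ===== LEMMAS AND PROOFS =====

-- a two-character suffix check is a pair of tests on the last two characters
lemma ends2_append (pre : List Char) (a b c1 c2 : Char) :
    PySem.Chars.endswith (pre ++ [a, b]) [c1, c2] = (c1 == a && c2 == b) := by
  rcases h : (c1 == a && c2 == b) with _ | _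
  · rw [Bool.eq_false_iff]
    intro hc
    rw [PySem.Chars.endswith_iff] at hc
    obtain ⟨t, ht⟩ := hc
    have hlen : t.length = pre.length := by
      have := congrArg List.length ht; simp at this; omega
    have h2 : [c1, c2] = [a, b] := List.append_inj_right ht hlen
    simp at h2
    simp [h2.1, h2.2] at h
  · rw [PySem.Chars.endswith_iff]
    simp only [Bool.and_eq_true, beq_iff_eq] at h
    exact ⟨pre, by simp [h.1, h.2]⟩

-- the eight separator+l/r endswith tests, disjoined, equal B's last-two-characters condition
lemma two_or_eq (ll : List Char) :
    (PySem.Chars.endswith ll ['_','l'] || PySem.Chars.endswith ll ['_','r'] ||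
     PySem.Chars.endswith ll ['.','l'] || PySem.Chars.endswith ll ['.','r'] ||
     PySem.Chars.endswith ll ['-','l'] || PySem.Chars.endswith ll ['-','r'] ||
     PySem.Chars.endswith ll [' ','l'] || PySem.Chars.endswith ll [' ','r'])
    = (decide (2 ≤ (ll.length : Int))
        && (PySem.List.pyGet? ll (-1)).any (fun c => c == 'l' || c == 'r')
        && (PySem.List.pyGet? ll (-2)).any
            (fun c => c == '_' || c == '.' || c == '-' || c == ' ')) := by
  match hr : ll.reverse with
  | [] =>
    have h0 : ll = [] := by simpa using congrArg List.reverse hr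
    rw [h0]; decide
  | [b] =>
    have h0 : ll = [b] := by simpa using congrArg List.reverse hr
    rw [h0]
    simp [PySem.Chars.endswith, List.isSuffixOf, List.isPrefixOf]
  | b :: a :: rest =>
    have h0 : ll = rest.reverse ++ [a, b] := by simpa using congrArg List.reverse hr
    rw [h0]
    have h1 : PySem.List.pyGet? (rest.reverse ++ [a, b]) (-1) = some b := by
      rw [show rest.reverse ++ [a, b] = (rest.reverse ++ [a]) ++ [b] by simp]
      exact PySem.List.pyGet?_neg_one_append_singleton _ _
    have h2 : PySem.List.pyGet? (rest.reverse ++ [a, b]) (-2) = some a := by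
      rw [PySem.List.pyGet?_neg_ofNat _ 2 (by omega) (by simp)]
      simp
    rw [h1, h2]
    simp only [ends2_append, List.length_append, List.length_reverse, Option.any_some]
    refine Bool.eq_iff_iff.mpr ?_
    simp only [Bool.or_eq_true, Bool.and_eq_true, beq_iff_eq, decide_eq_true_eq]
    constructor
    · rintro (((((((⟨hx,hy⟩|⟨hx,hy⟩)|⟨hx,hy⟩)|⟨hx,hy⟩)|⟨hx,hy⟩)|⟨hx,hy⟩)|⟨hx,hy⟩)|⟨hx,hy⟩) <;>
        subst hx <;> subst hy <;> simp
    · rintro ⟨⟨hlen, hb|hb⟩, ((ha|ha)|ha)|ha⟩ <;> subst hb <;> subst ha <;> simp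


-- the same equality, stated verbatim in B's String-level syntax
lemma two_or_eq_str (low : String) :
    (PySem.Str.endswith low "_l" || PySem.Str.endswith low "_r" ||
     PySem.Str.endswith low ".l" || PySem.Str.endswith low ".r" ||
     PySem.Str.endswith low "-l" || PySem.Str.endswith low "-r" ||
     PySem.Str.endswith low " l" || PySem.Str.endswith low " r")
    = (decide (2 ≤ PySem.Str.len low)
        && (PySem.Str.pyGet? low (-1)).any (fun c => c == 'l' || c == 'r')
        && (PySem.Str.pyGet? low (-2)).any
            (fun c => c == '_' || c == '.' || c == '-' || c == ' ')) := by
  exact two_or_eq low.toList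

-- ===== VERDICT (by name: the statement is the Claim_ definition above) =====
theorem adv_rename_spec : Claim_equal_adv_rename := by
  intro string insertname _hdom
  unfold Spec_adv_rename adv_rename adv_rename_alt adv_rename_suffixes
  simp only [List.any_cons, List.any_nil]
  by_cases heL : PySem.Str.endswith (PySem.Str.lower string) "left"
  · simp only [heL, Bool.true_or, if_true, adv_rename_findIdx]
    norm_num [show (("left":String).length : Int) = 4 from by decide]
  · by_cases heR : PySem.Str.endswith (PySem.Str.lower string) "right"
    · simp only [heL, heR, Bool.true_or, Bool.false_or, if_true, adv_rename_findIdx,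
        Bool.false_eq_true, if_false]
      norm_num [show (("right":String).length : Int) = 5 from by decide]
    · have hkey := two_or_eq_str (PySem.Str.lower string)
      simp only [heL, heR, Bool.false_or, Bool.false_eq_true, if_false, adv_rename_findIdx]
      rw [← hkey]
      clear hkey
      split_ifs <;> first
        | (norm_num [show (("_l":String).length : Int) = 2 from by decide,
            show (("_r":String).length : Int) = 2 from by decide,
            show ((".l":String).length : Int) = 2 from by decide,
            show ((".r":String).length : Int) = 2 from by decide,
            show (("-l":String).length : Int) = 2 from by decide,
            show (("-r":String).length : Int) = 2 from by decide,
            show ((" l":String).length : Int) = 2 from by decide,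
            show ((" r":String).length : Int) = 2 from by decide]; done)
        | (simp_all; done)
        | (apply String.toList_inj.mp
           simp [PySem.Str.toList_slice, PySem.Str.len_eq, PySem.List.slice_to,
             PySem.List.slice_from, -String.length_toList])
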